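-- pv_equiv track=rewrite | github.com/diekisi/tp_tda_1C2025 | tp_1/greedy.py | asignar_transacciones_2
-- ===== SOURCE A (Python) =====
-- def asignar_transacciones_2(transacciones_aproximadas, transacciones_sospechoso):
--     n = len(transacciones_aproximadas)
--
--     # Construimos la lista de intervalos con su índice original
--     intervalos = []
--     for i, (t, e) in enumerate(transacciones_aproximadas):
--         a = t - e
--         b = t + e
--         intervalos.append((a, b, i))
--
--     # Ordenamos los intervalos por su extremo derecho (b)
--     intervalos.sort(key=lambda x: x[1])
--
--
--
--     asignacion = [None] * n  # asignacion[i] guardará el timestamp asignado para la transacción con índice i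
--
--     usados = set()
--     # Recorremos cada intervalo (en orden de b)
--     for a, b, i in intervalos:
--         j = 0  # puntero para transacciones_sospechoso
--         while transacciones_sospechoso[j] < a or transacciones_sospechoso[j] > b or transacciones_sospechoso[j] in usados:
--             j += 1
--             if j >= n:
--                 return None
--
--         asignacion[i] = transacciones_sospechoso[j]
--         usados.add(transacciones_sospechoso[j])
--
--
--     resultado = [(i, asignacion[i]) for i in range(n)]
--     resultado.sort(key=lambda x: x[1])
--     return resultado
-- ===== SOURCE B (Python) =====
-- def asignar_transacciones_2(transacciones_aproximadas, transacciones_sospechoso):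
--     n = len(transacciones_aproximadas)
--     intervalos = sorted(
--         ((t - e, t + e, i) for i, (t, e) in enumerate(transacciones_aproximadas)),
--         key=lambda x: x[1],
--     )
--     # distinct candidate timestamps among the first n suspects, first-occurrence order
--     pool = list(dict.fromkeys(transacciones_sospechoso[:n]))
--     asignacion = [None] * n
--     for a, b, i in intervalos:
--         v = next((v for v in pool if a <= v <= b), None)
--         if v is None:
--             return None
--         pool.remove(v)
--         asignacion[i] = v
--     return sorted(((i, v) for i, v in enumerate(asignacion)), key=lambda x: x[1])
-- ===== Notes on version B (the rewrite author's own statement) =====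
-- stated objective: alternative
-- what changed: A rescans the raw suspect list from index 0 for every interval, skipping used values via a 'usados' set and a pointer capped at n; B dedups the first n suspects once into a shrinking pool of still-available candidates, takes the first in-range pool element and removes it, so the used-value skipping and pointer/cap bookkeeping disappear.
import Mathlib
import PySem

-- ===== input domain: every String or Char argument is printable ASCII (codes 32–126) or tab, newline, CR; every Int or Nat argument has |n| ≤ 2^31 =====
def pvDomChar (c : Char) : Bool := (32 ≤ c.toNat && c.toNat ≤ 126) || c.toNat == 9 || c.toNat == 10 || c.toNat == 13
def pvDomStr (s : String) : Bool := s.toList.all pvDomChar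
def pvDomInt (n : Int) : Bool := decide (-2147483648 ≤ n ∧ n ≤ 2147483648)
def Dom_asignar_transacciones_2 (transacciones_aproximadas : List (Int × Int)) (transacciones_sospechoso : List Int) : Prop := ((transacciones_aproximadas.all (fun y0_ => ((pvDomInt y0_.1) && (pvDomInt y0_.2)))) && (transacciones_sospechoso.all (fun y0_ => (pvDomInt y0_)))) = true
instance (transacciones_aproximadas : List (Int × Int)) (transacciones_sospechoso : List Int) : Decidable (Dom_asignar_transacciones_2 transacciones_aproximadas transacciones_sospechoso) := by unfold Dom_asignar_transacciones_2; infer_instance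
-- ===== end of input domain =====

-- B replaces A's per-interval rescan of the raw suspect list (pointer + used-value set) by a
-- deduplicated pool of still-available candidate timestamps from which the chosen value is removed
-- (objective: alternative; same worst-case cost).

-- ===== PORT A =====
-- the while loop: scan transacciones_sospechoso from index j while the value is out of [a,b] or used;
-- a missing index (Python IndexError, only reachable when len ts < n, i.e. outside Pre_) is conflated
-- with the overall None result.
def pvFindJ (ts : List Int) (n : Nat) (usados : PySem.Set Int) (a b : Int) (j : Nat) : Option Int :=
  match ts[j]? with
  | none => none      -- IndexError in Python; outside Pre_asignar_transacciones_2
  | some v =>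
    if v < a ∨ b < v ∨ PySem.Set.contains usados v = true then
      if n ≤ j + 1 then none
      else pvFindJ ts n usados a b (j + 1)
    else some v
termination_by n - j
decreasing_by omega

-- the 'for a, b, i in intervalos' loop with state (asignacion, usados); None propagates (early return)
def pvLoopA (ts : List Int) (n : Nat) : List (Int × Int × Nat) → List (Option Int) → PySem.Set Int → Option (List (Option Int))
  | [], asig, _ => some asig
  | (a, b, i) :: rest, asig, usados =>
    match pvFindJ ts n usados a b 0 with
    | none => none
    | some v => pvLoopA ts n rest (asig.set i (some v)) (PySem.Set.add usados v)

def asignar_transacciones_2 (transacciones_aproximadas : List (Int × Int)) (transacciones_sospechoso : List Int) : Option (List (Int × Int)) :=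
  let n := transacciones_aproximadas.length
  let intervalos := (PySem.List.enumerate transacciones_aproximadas).map
      (fun p => (p.2.1 - p.2.2, p.2.1 + p.2.2, p.1.toNat))
  let intervalos := PySem.List.sorted intervalos (fun x => x.2.1)
  match pvLoopA transacciones_sospechoso n intervalos (List.replicate n none) PySem.Set.empty with
  | none => none
  | some asig =>
    -- resultado = [(i, asignacion[i]) for i in range(n)]; every asignacion[i] has been set (getD 0 is never used)
    some (PySem.List.sorted ((List.range n).map (fun (i : Nat) => ((i : Int), ((asig[i]?).join.getD 0)))) (fun x => x.2))

-- ===== PORT B =====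
-- next((v for v in pool if a <= v <= b), None)
def pvFirstInRange (pool : List Int) (a b : Int) : Option Int :=
  pool.find? (fun v => a ≤ v && v ≤ b)

-- the 'for a, b, i in intervalos' loop, with the shrinking pool of available candidates
def pvLoopB : List (Int × Int × Nat) → List Int → List (Option Int) → Option (List (Option Int))
  | [], _, asig => some asig
  | (a, b, i) :: rest, pool, asig =>
    match pvFirstInRange pool a b with
    | none => none
    | some v =>
      match PySem.List.remove? pool v with
      | none => none   -- unreachable: v was found in pool
      | some pool' => pvLoopB rest pool' (asig.set i (some v))

def asignar_transacciones_2_alt (transacciones_aproximadas : List (Int × Int)) (transacciones_sospechoso : List Int) : Option (List (Int × Int)) :=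
  let n := transacciones_aproximadas.length
  let intervalos := PySem.List.sorted
      ((PySem.List.enumerate transacciones_aproximadas).map
        (fun p => (p.2.1 - p.2.2, p.2.1 + p.2.2, p.1.toNat)))
      (fun x => x.2.1)
  let pool := PySem.List.dedup (transacciones_sospechoso.take n)   -- list(dict.fromkeys(ts[:n]))
  match pvLoopB intervalos pool (List.replicate n none) with
  | none => none
  | some asig =>
    some (PySem.List.sorted
      ((PySem.List.enumerate asig).map (fun p => (p.1, p.2.getD 0)))
      (fun x => x.2))

-- ===== PRECONDITION & SPEC =====
-- Pre_ excludes exactly the inputs on which the Python A raises IndexError: fewer suspect timestamps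
-- than transactions (on every such input A's scan runs past the end of the suspect list).
def Pre_asignar_transacciones_2 (transacciones_aproximadas : List (Int × Int)) (transacciones_sospechoso : List Int) : Prop :=
  transacciones_aproximadas.length ≤ transacciones_sospechoso.length
instance (transacciones_aproximadas : List (Int × Int)) (transacciones_sospechoso : List Int) : Decidable (Pre_asignar_transacciones_2 transacciones_aproximadas transacciones_sospechoso) := by unfold Pre_asignar_transacciones_2; infer_instance

def pvWitness_asignar_transacciones_2 : (List (Int × Int)) × List Int := ([(5, 1), (9, 2)], [8, 4])

def Spec_asignar_transacciones_2 (transacciones_aproximadas : List (Int × Int)) (transacciones_sospechoso : List Int) (out : Option (List (Int × Int))) : Prop := out = asignar_transacciones_2_alt transacciones_aproximadas transacciones_sospechoso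
instance (transacciones_aproximadas : List (Int × Int)) (transacciones_sospechoso : List Int) (out : Option (List (Int × Int))) : Decidable (Spec_asignar_transacciones_2 transacciones_aproximadas transacciones_sospechoso out) := by unfold Spec_asignar_transacciones_2; infer_instance

-- ===== CLAIM (what is proved, stated in full; the proofs are below) =====
def Claim_equal_asignar_transacciones_2 : Prop := ∀ (transacciones_aproximadas : List (Int × Int)) (transacciones_sospechoso : List Int), Dom_asignar_transacciones_2 transacciones_aproximadas transacciones_sospechoso → Pre_asignar_transacciones_2 transacciones_aproximadas transacciones_sospechoso → Spec_asignar_transacciones_2 transacciones_aproximadas transacciones_sospechoso (asignar_transacciones_2 transacciones_aproximadas transacciones_sospechoso)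


-- ===== LEMMAS AND PROOFS =====

-- first match in a set built by folding Set.add: the accumulator's match, else the list's match
theorem pv_find?_foldl_add (R : Int → Bool) : ∀ (xs : List Int) (s : PySem.Set Int),
    ((xs.foldl PySem.Set.add s).find? R) = ((s.find? R).or (xs.find? R)) := by
  intro xs
  induction xs with
  | nil => intro s; simp
  | cons x xs ih =>
    intro s
    have hstep : (x :: xs).foldl PySem.Set.add s = xs.foldl PySem.Set.add (PySem.Set.add s x) := rfl
    rw [hstep, ih]
    rw [PySem.Set.add_eq_ite]
    by_cases hm : x ∈ s
    · rw [if_pos hm]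
      cases h : s.find? R with
      | some w => simp [h]
      | none =>
        have hRx : R x = false := by
          have := List.find?_eq_none.mp h x hm
          simpa using this
        simp [h, List.find?_cons, hRx]
    · rw [if_neg hm, List.find?_append]
      cases h : s.find? R with
      | some w => simp [h]
      | none =>
        cases hRx : R x <;> simp [h, List.find?_cons, hRx]

-- first match is unaffected by first-occurrence deduplication
theorem pv_find?_dedup (R : Int → Bool) (xs : List Int) :
    (PySem.List.dedup xs).find? R = xs.find? R := by
  have h1 : PySem.List.dedup xs = xs.foldl PySem.Set.add PySem.Set.empty := by
    rw [PySem.List.dedup_eq_ofList, PySem.Set.ofList_eq_foldl]; rfl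
  rw [h1, pv_find?_foldl_add]
  simp

theorem pv_find?_filter (P Q : Int → Bool) (l : List Int) :
    (l.filter Q).find? P = l.find? (fun v => Q v && P v) := by
  induction l with
  | nil => rfl
  | cons x xs ih =>
    by_cases hq : Q x
    · by_cases hp : P x <;> simp [List.filter_cons, List.find?_cons, hq, hp, ih]
    · simp only [Bool.not_eq_true] at hq
      simp [List.filter_cons, List.find?_cons, hq, ih]

-- A's pointer scan computes the first unused in-range value among the first n suspects
theorem pv_findJ_eq (ts : List Int) (n : Nat) (usados : PySem.Set Int) (a b : Int)
    (hn : n ≤ ts.length) : ∀ j, j < n →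
    pvFindJ ts n usados a b j
      = (((ts.take n).drop j).filter (fun v => !(PySem.Set.contains usados v))).find?
          (fun v => a ≤ v && v ≤ b) := by
  have H : ∀ fuel j, j < n → n - j ≤ fuel →
      pvFindJ ts n usados a b j
        = (((ts.take n).drop j).filter (fun v => !(PySem.Set.contains usados v))).find?
            (fun v => a ≤ v && v ≤ b) := by
    intro fuel
    induction fuel with
    | zero => intro j hj hf; omega
    | succ f ihf =>
      intro j hj hf
      have hjlen : j < ts.length := lt_of_lt_of_le hj hn
      have hg : ts[j]? = some ts[j] := List.getElem?_eq_getElem hjlen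
      have hjt : j < (ts.take n).length := by
        simp only [List.length_take]; omega
      have hgt : (ts.take n)[j] = ts[j] := List.getElem_take
      rw [pvFindJ, hg, List.drop_eq_getElem_cons hjt, hgt]
      dsimp only
      by_cases hc : ts[j] < a ∨ b < ts[j] ∨ PySem.Set.contains usados ts[j] = true
      · rw [if_pos hc]
        by_cases hu : PySem.Set.contains usados ts[j] = true
        · -- used: the head is filtered out
          have hum : ts[j] ∈ usados := by simpa using hu
          by_cases hnj : n ≤ j + 1
          · rw [if_pos hnj]
            have hdrop : (ts.take n).drop (j + 1) = [] := by
              apply List.drop_eq_nil_of_le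
              simp only [List.length_take]; omega
            simp [List.filter_cons, hum, hdrop]
          · rw [if_neg hnj, ihf (j + 1) (by omega) (by omega)]
            simp [List.filter_cons, hum]
        · -- unused but out of range: kept by the filter, rejected by find?
          have hum : ts[j] ∉ usados := fun hm => hu (by simpa using hm)
          have hnr : ¬(a ≤ ts[j] ∧ ts[j] ≤ b) := by
            rcases hc with h | h | h
            · omega
            · omega
            · exact absurd h hu
          have hr : (decide (a ≤ ts[j]) && decide (ts[j] ≤ b)) = false := by
            simp only [Bool.and_eq_false_iff, decide_eq_false_iff_not]
            tauto
          by_cases hnj : n ≤ j + 1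
          · rw [if_pos hnj]
            have hdrop : (ts.take n).drop (j + 1) = [] := by
              apply List.drop_eq_nil_of_le
              simp only [List.length_take]; omega
            simp [List.filter_cons, hum, hdrop, List.find?_cons, hr]
          · rw [if_neg hnj, ihf (j + 1) (by omega) (by omega)]
            simp [List.filter_cons, hum, List.find?_cons, hr]
      · rw [if_neg hc]
        push_neg at hc
        obtain ⟨h1, h2, h3⟩ := hc
        have hum : ts[j] ∉ usados := fun hm => h3 (by simpa using hm)
        have hr : (decide (a ≤ ts[j]) && decide (ts[j] ≤ b)) = true := by
          simp only [Bool.and_eq_true, decide_eq_true_eq]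
          omega
        simp [List.filter_cons, hum, List.find?_cons, hr]
  exact fun j hj => H (n - j) j hj le_rfl

-- the two loops agree, given the pool invariant: pool = unused first-occurrence values of ts[:n]
theorem pv_loop_eq (ts : List Int) (n : Nat) (hn : n ≤ ts.length) :
    ∀ (ivs : List (Int × Int × Nat)) (asig : List (Option Int)) (usados : PySem.Set Int) (pool : List Int),
    (ivs ≠ [] → 0 < n) →
    pool = (PySem.List.dedup (ts.take n)).filter (fun v => !(PySem.Set.contains usados v)) →
    pvLoopA ts n ivs asig usados = pvLoopB ivs pool asig := by
  intro ivs
  induction ivs with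
  | nil => intro asig usados pool _ _; rfl
  | cons hd rest ih =>
    intro asig usados pool hne hpool
    obtain ⟨a, b, i⟩ := hd
    have hn0 : 0 < n := hne (by simp)
    have hfind : pvFindJ ts n usados a b 0 = pool.find? (fun v => a ≤ v && v ≤ b) := by
      have hL : (((ts.take n)).filter (fun v => !(PySem.Set.contains usados v))).find?
            (fun v => a ≤ v && v ≤ b)
          = (ts.take n).find?
            (fun v => (!(PySem.Set.contains usados v)) && (decide (a ≤ v) && decide (v ≤ b))) :=
        pv_find?_filter _ _ _
      have hR : (((PySem.List.dedup (ts.take n))).filter (fun v => !(PySem.Set.contains usados v))).find?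
            (fun v => a ≤ v && v ≤ b)
          = (ts.take n).find?
            (fun v => (!(PySem.Set.contains usados v)) && (decide (a ≤ v) && decide (v ≤ b))) := by
        rw [pv_find?_filter, pv_find?_dedup]
      rw [pv_findJ_eq ts n usados a b hn 0 hn0, List.drop_zero, hpool]
      exact hL.trans hR.symm
    simp only [pvLoopA, pvLoopB, pvFirstInRange, hfind]
    cases hfv : pool.find? (fun v => a ≤ v && v ≤ b) with
    | none => simp [hfv]
    | some v =>
      simp only [hfv]
      have hmem : v ∈ pool := List.mem_of_find?_eq_some hfv
      have hnd : pool.Nodup := by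
        rw [hpool]
        exact (PySem.List.nodup_dedup _).filter _
      have hrem : PySem.List.remove? pool v = some (pool.erase v) :=
        PySem.List.remove?_eq_some_erase pool v hmem
      have hpool' : pool.erase v
          = (PySem.List.dedup (ts.take n)).filter
              (fun w => !(PySem.Set.contains (PySem.Set.add usados v) w)) := by
        rw [hnd.erase_eq_filter, hpool, List.filter_filter]
        apply List.filter_congr
        intro w _
        by_cases h1 : w ∈ usados <;> by_cases h2 : w = v <;>
          simp [PySem.Set.mem_add, h1, h2]
      rw [hrem]
      exact ih (asig.set i (some v)) (PySem.Set.add usados v) (pool.erase v)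
        (fun _ => hn0) hpool'
  
theorem pv_loopB_length : ∀ (ivs : List (Int × Int × Nat)) (pool : List Int)
    (asig : List (Option Int)) (r : List (Option Int)),
    pvLoopB ivs pool asig = some r → r.length = asig.length := by
  intro ivs
  induction ivs with
  | nil =>
    intro pool asig r h
    simp only [pvLoopB] at h
    cases h
    rfl
  | cons hd rest ih =>
    intro pool asig r h
    obtain ⟨a, b, i⟩ := hd
    simp only [pvLoopB] at h
    cases hf : pvFirstInRange pool a b with
    | none => rw [hf] at h; simp at h
    | some v =>
      rw [hf] at h
      dsimp only at h
      cases hr : PySem.List.remove? pool v with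
      | none => rw [hr] at h; simp at h
      | some pool' =>
        rw [hr] at h
        have := ih pool' (asig.set i (some v)) r h
        simpa using this

-- [(i, asignacion[i]) for i in range(n)] = [(i, v) for i, v in enumerate(asignacion)] when len = n
theorem pv_final_eq (asig : List (Option Int)) (n : Nat) (h : asig.length = n) :
    (List.range n).map (fun (i : Nat) => ((i : Int), ((asig[i]?).join.getD 0)))
      = (PySem.List.enumerate asig).map (fun p => (p.1, p.2.getD 0)) := by
  apply List.ext_getElem
  · simp [PySem.List.length_enumerate, h]
  · intro k h1 h2
    have hk : k < asig.length := by simpa [h] using h1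
    simp [PySem.List.getElem_enumerate, List.getElem?_eq_getElem hk, Option.join]

-- ===== VERDICT (by name: the statement is the Claim_ definition above) =====
theorem asignar_transacciones_2_spec : Claim_equal_asignar_transacciones_2 := by
  unfold Claim_equal_asignar_transacciones_2
  intro ta ts _ hpre
  unfold Pre_asignar_transacciones_2 at hpre
  unfold Spec_asignar_transacciones_2
  simp only [asignar_transacciones_2, asignar_transacciones_2_alt]
  have hlivs : (PySem.List.sorted ((PySem.List.enumerate ta).map
      (fun p => (p.2.1 - p.2.2, p.2.1 + p.2.2, p.1.toNat))) (fun x => x.2.1)).length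
      = ta.length := by
    rw [PySem.List.length_sorted]
    simp [PySem.List.length_enumerate]
  have hloop := pv_loop_eq ts ta.length hpre
    (PySem.List.sorted ((PySem.List.enumerate ta).map
      (fun p => (p.2.1 - p.2.2, p.2.1 + p.2.2, p.1.toNat))) (fun x => x.2.1))
    (List.replicate ta.length none) PySem.Set.empty
    (PySem.List.dedup (ts.take ta.length))
    (fun hne => by
      have hpos : 0 < (PySem.List.sorted ((PySem.List.enumerate ta).map
          (fun p => (p.2.1 - p.2.2, p.2.1 + p.2.2, p.1.toNat))) (fun x => x.2.1)).length :=
        List.length_pos_of_ne_nil hne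
      omega)
    (by simp [PySem.Set.empty])
  rw [hloop]
  cases h : pvLoopB
      (PySem.List.sorted ((PySem.List.enumerate ta).map
        (fun p => (p.2.1 - p.2.2, p.2.1 + p.2.2, p.1.toNat))) (fun x => x.2.1))
      (PySem.List.dedup (ts.take ta.length)) (List.replicate ta.length none) with
  | none => rfl
  | some asig =>
    have hlen : asig.length = ta.length := by
      have := pv_loopB_length _ _ _ _ h
      simpa using this
    dsimp only
    rw [pv_final_eq asig ta.length hlen]
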